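-- pv_equiv track=rewrite | github.com/asperaa/back_to_grind | DP/GFG. Insertion_And_Deletion_To_Convert_str.py | convert
-- ===== SOURCE A (Python) =====
-- def convert(text1, text2, m, n):
--     dp = [[None for _ in range(n+1)]for _ in range(m+1)]
--     for i in range(m+1):
--         dp[i][0] = 0
--     for j in range(n+1):
--         dp[0][j] = 0
--     for i in range(1, m+1):
--         for j in range(1, n+1):
--             if text1[i-1] == text2[j-1]:
--                 dp[i][j] = 1 + dp[i-1][j-1]
--             else:
--                 dp[i][j] = max(dp[i-1][j], dp[i][j-1])
--     return m + n - 2 * dp[m][n]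
-- ===== SOURCE B (Python) =====
-- def convert(text1, text2, m, n):
--     # Top-down memoized evaluation of the LCS recurrence with an explicit
--     # work stack (iterative DFS over the subproblem DAG) instead of A's
--     # bottom-up table fill; only reachable subproblems are computed.
--     memo = {}
--
--     def val(i, j):
--         return 0 if i == 0 or j == 0 else memo.get((i, j))
--
--     stack = [(m, n)]
--     while stack:
--         i, j = stack[-1]
--         if i == 0 or j == 0 or (i, j) in memo:
--             stack.pop()
--         elif text1[i-1] == text2[j-1]:
--             d = val(i-1, j-1)
--             if d is None:
--                 stack.append((i-1, j-1))
--             else: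
--                 memo[(i, j)] = d + 1
--                 stack.pop()
--         else:
--             u = val(i-1, j)
--             l = val(i, j-1)
--             if u is None:
--                 stack.append((i-1, j))
--             elif l is None:
--                 stack.append((i, j-1))
--             else:
--                 memo[(i, j)] = max(u, l)
--                 stack.pop()
--     return m + n - 2 * (0 if m == 0 or n == 0 else memo[(m, n)])
-- ===== Notes on version B (the rewrite author's own statement) =====
-- stated objective: alternative
-- what changed: Replaces A's bottom-up tabulation (full (m+1)x(n+1) table with explicit base-case passes) by top-down memoized evaluation of the LCS recurrence using an explicit work stack (iterative DFS over the subproblem DAG, dict memo keyed by (i,j)); only subproblems reachable from (m,n) are computed.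
import Mathlib
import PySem

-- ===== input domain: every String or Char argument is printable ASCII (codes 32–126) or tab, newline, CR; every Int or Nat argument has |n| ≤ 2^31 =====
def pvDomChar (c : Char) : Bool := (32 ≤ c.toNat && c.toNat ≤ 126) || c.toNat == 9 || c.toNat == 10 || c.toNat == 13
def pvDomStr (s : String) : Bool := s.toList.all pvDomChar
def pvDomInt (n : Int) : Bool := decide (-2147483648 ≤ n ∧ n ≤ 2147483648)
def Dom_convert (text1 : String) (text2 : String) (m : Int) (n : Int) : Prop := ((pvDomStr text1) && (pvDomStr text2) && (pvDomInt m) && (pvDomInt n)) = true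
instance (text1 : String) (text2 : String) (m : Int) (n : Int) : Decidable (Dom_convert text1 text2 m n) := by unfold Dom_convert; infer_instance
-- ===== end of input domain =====

-- B replaces A's bottom-up tabulation by top-down memoized evaluation of the LCS
-- recurrence with an explicit work stack (iterative DFS over the subproblem DAG).

-- ===== PORT A =====
-- dp[i][j] read (an int wherever Python reads one; the `.getD 0` unwrap of the Option
-- is never reached with `none` on admitted inputs)
def pvGet2 (dp : List (List (Option Int))) (i j : Int) : Int :=
  (PySem.List.pyGetD (PySem.List.pyGetD dp i ([] : List (Option Int))) j none).getD 0

-- dp[i][j] = v (loop indices are nonnegative, so `.toNat` is exact here)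
def pvSet2 (dp : List (List (Option Int))) (i j : Int) (v : Option Int) : List (List (Option Int)) :=
  dp.set i.toNat ((dp.getD i.toNat []).set j.toNat v)

-- body of A's inner loop (one cell of row i)
def pvCellA (text1 text2 : String) (i : Int) (dp : List (List (Option Int))) (j : Int) :
    List (List (Option Int)) :=
  if PySem.Str.pyGet? text1 (i-1) = PySem.Str.pyGet? text2 (j-1) then
    pvSet2 dp i j (some (1 + pvGet2 dp (i-1) (j-1)))
  else
    pvSet2 dp i j (some (max (pvGet2 dp (i-1) j) (pvGet2 dp i (j-1))))

-- body of A's outer loop (fills row i)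
def pvRowA (text1 text2 : String) (n : Int) (dp : List (List (Option Int))) (i : Int) :
    List (List (Option Int)) :=
  (PySem.List.pyRange 1 (n+1) 1).foldl (pvCellA text1 text2 i) dp

def convert (text1 : String) (text2 : String) (m : Int) (n : Int) : Int :=
  let dp0 : List (List (Option Int)) :=
    (PySem.List.pyRange 0 (m+1) 1).map (fun _ =>
      (PySem.List.pyRange 0 (n+1) 1).map (fun _ => (none : Option Int)))
  let dp1 := (PySem.List.pyRange 0 (m+1) 1).foldl (fun dp i => pvSet2 dp i 0 (some 0)) dp0
  let dp2 := (PySem.List.pyRange 0 (n+1) 1).foldl (fun dp j => pvSet2 dp 0 j (some 0)) dp1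
  let dp3 := (PySem.List.pyRange 1 (m+1) 1).foldl (pvRowA text1 text2 n) dp2
  m + n - 2 * pvGet2 dp3 m n

-- ===== PORT B =====
-- B's helper val(i, j): 0 at the base of the recurrence, else the memo entry (None if absent)
def pvValB (memo : PySem.Dict (Int × Int) Int) (i j : Int) : Option Int :=
  if i = 0 ∨ j = 0 then some 0 else memo.get? (i, j)

-- one iteration of B's while loop; state = (stack, memo); identity on the empty stack
def pvStepB (text1 text2 : String)
    (st : List (Int × Int) × PySem.Dict (Int × Int) Int) :
    List (Int × Int) × PySem.Dict (Int × Int) Int :=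
  match st with
  | ([], memo) => ([], memo)
  | ((i, j) :: rest, memo) =>
    if i = 0 ∨ j = 0 ∨ memo.contains (i, j) then (rest, memo)
    else if PySem.Str.pyGet? text1 (i-1) = PySem.Str.pyGet? text2 (j-1) then
      match pvValB memo (i-1) (j-1) with
      | none => ((i-1, j-1) :: (i, j) :: rest, memo)
      | some d => (rest, memo.insert (i, j) (d + 1))
    else
      match pvValB memo (i-1) j with
      | none => ((i-1, j) :: (i, j) :: rest, memo)
      | some u =>
        match pvValB memo i (j-1) with
        | none => ((i, j-1) :: (i, j) :: rest, memo)
        | some l => (rest, memo.insert (i, j) (max u l))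

-- B's while loop: run `pvStepB` until the stack is empty (the fuel only makes it
-- total; it is proved sufficient below, so the loop always ends by exhausting its
-- stack exactly as the Python loop does)
def pvLoopB (text1 text2 : String) :
    Nat → List (Int × Int) × PySem.Dict (Int × Int) Int →
      List (Int × Int) × PySem.Dict (Int × Int) Int
  | 0, st => st
  | f + 1, st =>
    match st with
    | ([], memo) => ([], memo)
    | st => pvLoopB text1 text2 f (pvStepB text1 text2 st)

def convert_alt (text1 : String) (text2 : String) (m : Int) (n : Int) : Int :=
  -- `memo[(m,n)]` is read with `.getD 0`; the default is never reached on admitted inputs.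
  m + n - 2 * (if m = 0 ∨ n = 0 then 0 else
    ((pvLoopB text1 text2 (3 ^ (m.toNat + n.toNat) + 1)
        ([(m, n)], (PySem.Dict.empty : PySem.Dict (Int × Int) Int))).2.get? (m, n)).getD 0)

-- ===== PRECONDITION & SPEC =====
-- Pre_ is exactly where Python A returns normally: negative m or n raises IndexError,
-- and m > len(text1) (resp. n > len(text2)) raises IndexError unless the indexing loop
-- is never entered (n = 0, resp. m = 0).
def Pre_convert (text1 : String) (text2 : String) (m : Int) (n : Int) : Prop :=
  0 ≤ m ∧ 0 ≤ n ∧ (n = 0 ∨ m ≤ PySem.Str.len text1) ∧ (m = 0 ∨ n ≤ PySem.Str.len text2)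
instance (text1 : String) (text2 : String) (m : Int) (n : Int) : Decidable (Pre_convert text1 text2 m n) := by unfold Pre_convert; infer_instance
def pvWitness_convert : String × String × Int × Int := ("abcb", "bdcab", 4, 5)

def Spec_convert (text1 : String) (text2 : String) (m : Int) (n : Int) (out : Int) : Prop := out = convert_alt text1 text2 m n
instance (text1 : String) (text2 : String) (m : Int) (n : Int) (out : Int) : Decidable (Spec_convert text1 text2 m n out) := by unfold Spec_convert; infer_instance

-- ===== CLAIM (what is proved, stated in full; the proofs are below) =====
def Claim_equal_convert : Prop := ∀ (text1 : String) (text2 : String) (m : Int) (n : Int), Dom_convert text1 text2 m n → Pre_convert text1 text2 m n → Spec_convert text1 text2 m n (convert text1 text2 m n)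

-- ===== LEMMAS AND PROOFS =====

-- Reference LCS-of-prefixes value (proof-only; neither port uses it).
def pvL (a b : List Char) : Nat → Nat → Int
  | 0, _ => 0
  | _+1, 0 => 0
  | i+1, j+1 =>
    if a.getD i ' ' = b.getD j ' ' then 1 + pvL a b i j
    else max (pvL a b (i+1) j) (pvL a b i (j+1))
termination_by i j => i + j
decreasing_by all_goals omega

theorem pvL_zero_left (a b : List Char) (j : Nat) : pvL a b 0 j = 0 := by
  cases j <;> simp [pvL]

theorem pvL_zero_right (a b : List Char) (i : Nat) : pvL a b i 0 = 0 := by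
  cases i <;> simp [pvL]

-- dp[i][j] as an Option, Nat indices (proof-side view of pvGet2)
def pvGet2o (dp : List (List (Option Int))) (i j : Nat) : Option Int :=
  (dp.getD i []).getD j none

theorem pvGet2_eq (dp : List (List (Option Int))) (i j : Nat) :
    pvGet2 dp (i : Int) (j : Int) = (pvGet2o dp i j).getD 0 := by
  simp [pvGet2, pvGet2o]

-- shape of the table
def pvShape (dp : List (List (Option Int))) (M N : Nat) : Prop :=
  dp.length = M + 1 ∧ ∀ r ∈ dp, r.length = N + 1

theorem pvRowLen {dp : List (List (Option Int))} {M N : Nat} (h : pvShape dp M N)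
    {i : Nat} (hi : i ≤ M) : (dp.getD i []).length = N + 1 := by
  obtain ⟨h1, h2⟩ := h
  have hilt : i < dp.length := by omega
  rw [List.getD_eq_getElem _ _ hilt]
  exact h2 _ (List.getElem_mem hilt)

theorem pvShape_pvSet2 {dp : List (List (Option Int))} {M N : Nat} (h : pvShape dp M N)
    (i j : Int) (v : Option Int) : pvShape (pvSet2 dp i j v) M N := by
  obtain ⟨h1, h2⟩ := h
  unfold pvSet2
  by_cases hi : i.toNat < dp.length
  · refine ⟨by simp [h1], ?_⟩
    intro r hr
    rcases List.mem_or_eq_of_mem_set hr with h | h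
    · exact h2 r h
    · subst h
      rw [List.length_set, List.getD_eq_getElem _ _ hi]
      exact h2 _ (List.getElem_mem hi)
  · rw [List.set_eq_of_length_le (by omega)]
    exact ⟨h1, h2⟩

theorem pvShape_foldl {M N : Nat} {F : List (List (Option Int)) → Int → List (List (Option Int))}
    (hF : ∀ dp k, pvShape dp M N → pvShape (F dp k) M N)
    (L : List Int) {dp : List (List (Option Int))} (h : pvShape dp M N) :
    pvShape (L.foldl F dp) M N := by
  induction L generalizing dp with
  | nil => exact h
  | cons k L ih => exact ih (hF dp k h)

theorem pvGetDset_self {α : Type} (l : List α) {i : Nat} (hi : i < l.length) (a d : α) :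
    (l.set i a).getD i d = a := by
  rw [List.getD_eq_getElem _ _ (by simpa using hi), List.getElem_set]
  simp

theorem pvGetDset_ne {α : Type} (l : List α) {i i' : Nat} (h : i ≠ i') (a d : α) :
    (l.set i a).getD i' d = l.getD i' d := by
  rw [List.getD_eq_getElem?_getD, List.getElem?_set_ne h, ← List.getD_eq_getElem?_getD]

theorem pvGet2o_pvSet2_self {dp : List (List (Option Int))} {M N : Nat} (hsh : pvShape dp M N)
    {i j : Nat} (hi : i ≤ M) (hj : j ≤ N) (v : Option Int) :
    pvGet2o (pvSet2 dp (i : Int) (j : Int) v) i j = v := by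
  have hilt : i < dp.length := by have := hsh.1; omega
  have hjlt : j < (dp.getD i []).length := by rw [pvRowLen hsh hi]; omega
  unfold pvGet2o pvSet2
  simp only [Int.toNat_natCast]
  rw [pvGetDset_self dp hilt, pvGetDset_self _ hjlt]

theorem pvGet2o_pvSet2_ne {dp : List (List (Option Int))} (i j : Nat) {i' j' : Nat}
    (h : ¬ (i' = i ∧ j' = j)) (v : Option Int) :
    pvGet2o (pvSet2 dp (i : Int) (j : Int) v) i' j' = pvGet2o dp i' j' := by
  unfold pvGet2o pvSet2
  simp only [Int.toNat_natCast]
  by_cases hii : i' = i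
  · subst hii
    have hjj : j ≠ j' := fun hc => h ⟨rfl, hc.symm⟩
    by_cases hilt : i' < dp.length
    · rw [pvGetDset_self dp hilt, pvGetDset_ne _ hjj]
    · rw [List.set_eq_of_length_le (by omega)]
  · rw [pvGetDset_ne dp (fun hc => hii hc.symm)]

theorem pvGet2o_pvSet2_self' {dp : List (List (Option Int))} {M N : Nat} (hsh : pvShape dp M N)
    {ii jj : Int} {i j : Nat} (hii : ii = (i : Int)) (hjj : jj = (j : Int))
    (hi : i ≤ M) (hj : j ≤ N) (v : Option Int) :
    pvGet2o (pvSet2 dp ii jj v) i j = v := by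
  subst hii; subst hjj; exact pvGet2o_pvSet2_self hsh hi hj v

theorem pvGet2o_pvSet2_ne' {dp : List (List (Option Int))} {ii jj : Int}
    (hii : 0 ≤ ii) (hjj : 0 ≤ jj) {i' j' : Nat}
    (h : ¬ (i' = ii.toNat ∧ j' = jj.toNat)) (v : Option Int) :
    pvGet2o (pvSet2 dp ii jj v) i' j' = pvGet2o dp i' j' := by
  have h1 : ii = ((ii.toNat : Nat) : Int) := by omega
  have h2 : jj = ((jj.toNat : Nat) : Int) := by omega
  rw [h1, h2]
  exact pvGet2o_pvSet2_ne _ _ h v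

-- initial table
theorem pvDp0 (M N : Nat) :
    ((PySem.List.pyRange 0 ((M : Int)+1) 1).map (fun _ =>
      (PySem.List.pyRange 0 ((N : Int)+1) 1).map (fun _ => (none : Option Int)))) =
    List.replicate (M+1) (List.replicate (N+1) (none : Option Int)) := by
  rw [PySem.List.pyRange_one, PySem.List.pyRange_one]
  have e1 : (((M : Int)+1) - 0).toNat = M + 1 := by omega
  have e2 : (((N : Int)+1) - 0).toNat = N + 1 := by omega
  rw [e1, e2]
  simp [Function.comp_def, List.map_const']

theorem pvShape_replicate (M N : Nat) :
    pvShape (List.replicate (M+1) (List.replicate (N+1) (none : Option Int))) M N := by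
  constructor
  · simp
  · intro r hr
    rw [List.eq_of_mem_replicate hr]
    simp

theorem pvGet2o_replicate (M N : Nat) (i j : Nat) (hi : i ≤ M) :
    pvGet2o (List.replicate (M+1) (List.replicate (N+1) (none : Option Int))) i j = none := by
  unfold pvGet2o
  have h1 : (List.replicate (M+1) (List.replicate (N+1) (none : Option Int))).getD i [] =
      List.replicate (N+1) (none : Option Int) := by
    rw [List.getD_eq_getElem _ _ (by simpa using by omega : i < (List.replicate (M+1) (List.replicate (N+1) (none : Option Int))).length)]
    simp
  rw [h1, List.getD_eq_getElem?_getD, List.getElem?_replicate]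
  split_ifs <;> simp

-- first base-case pass: dp[i][0] = 0
theorem pvFoldCol0 {M N : Nat} (L : List Int) (hL : ∀ k ∈ L, 0 ≤ k)
    {dp : List (List (Option Int))} (hsh : pvShape dp M N) (i j : Nat) (hi : i ≤ M) (hj : j ≤ N) :
    pvGet2o (L.foldl (fun dp k => pvSet2 dp k 0 (some 0)) dp) i j =
      if (i : Int) ∈ L ∧ j = 0 then some 0 else pvGet2o dp i j := by
  induction L generalizing dp with
  | nil => simp
  | cons k L ih =>
    have hk0 : 0 ≤ k := hL k (List.mem_cons_self)
    have hL' : ∀ x ∈ L, 0 ≤ x := fun x hx => hL x (List.mem_cons_of_mem _ hx)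
    simp only [List.foldl_cons]
    rw [ih hL' (pvShape_pvSet2 hsh k 0 (some 0))]
    by_cases hm : (i : Int) ∈ L ∧ j = 0
    · simp [hm]
    · simp only [if_neg hm]
      by_cases hik : (i : Int) = k ∧ j = 0
      · rw [pvGet2o_pvSet2_self' hsh (hik.1.symm) (by simp [hik.2]) hi hj]
        simp [← hik.1, hik.2]
      · rw [pvGet2o_pvSet2_ne' hk0 (by omega) (by
          intro hc
          apply hik
          constructor
          · omega
          · omega)]
        have : ¬ ((i : Int) ∈ k :: L ∧ j = 0) := by
          intro hc
          rcases List.mem_cons.mp hc.1 with h1 | h1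
          · exact hik ⟨h1, hc.2⟩
          · exact hm ⟨h1, hc.2⟩
        rw [if_neg this]

-- second base-case pass: dp[0][j] = 0
theorem pvFoldRow0 {M N : Nat} (L : List Int) (hL : ∀ k ∈ L, 0 ≤ k)
    {dp : List (List (Option Int))} (hsh : pvShape dp M N) (i j : Nat) (hi : i ≤ M) (hj : j ≤ N) :
    pvGet2o (L.foldl (fun dp k => pvSet2 dp 0 k (some 0)) dp) i j =
      if i = 0 ∧ (j : Int) ∈ L then some 0 else pvGet2o dp i j := by
  induction L generalizing dp with
  | nil => simp
  | cons k L ih =>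
    have hk0 : 0 ≤ k := hL k (List.mem_cons_self)
    have hL' : ∀ x ∈ L, 0 ≤ x := fun x hx => hL x (List.mem_cons_of_mem _ hx)
    simp only [List.foldl_cons]
    rw [ih hL' (pvShape_pvSet2 hsh 0 k (some 0))]
    by_cases hm : i = 0 ∧ (j : Int) ∈ L
    · simp [hm]
    · simp only [if_neg hm]
      by_cases hjk : i = 0 ∧ (j : Int) = k
      · rw [pvGet2o_pvSet2_self' hsh (by simp [hjk.1]) (hjk.2.symm) hi hj]
        simp [hjk.1, ← hjk.2]
      · rw [pvGet2o_pvSet2_ne' (by omega) hk0 (by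
          intro hc
          apply hjk
          constructor
          · omega
          · omega)]
        have : ¬ (i = 0 ∧ (j : Int) ∈ k :: L) := by
          intro hc
          rcases List.mem_cons.mp hc.2 with h1 | h1
          · exact hjk ⟨hc.1, h1⟩
          · exact hm ⟨hc.1, h1⟩
        rw [if_neg this]

-- the table after both base-case passes, characterised
theorem pvDp2 (M N : Nat) (i j : Nat) (hi : i ≤ M) (hj : j ≤ N) :
    pvGet2o ((PySem.List.pyRange 0 ((N : Int)+1) 1).foldl (fun dp j => pvSet2 dp 0 j (some 0))
      ((PySem.List.pyRange 0 ((M : Int)+1) 1).foldl (fun dp i => pvSet2 dp i 0 (some 0))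
        (List.replicate (M+1) (List.replicate (N+1) (none : Option Int))))) i j =
      if i = 0 ∨ j = 0 then some 0 else none := by
  have hpos1 : ∀ k ∈ PySem.List.pyRange 0 ((M : Int)+1) 1, 0 ≤ k := by
    intro k hk
    exact (PySem.List.mem_pyRange_one.mp hk).1
  have hpos2 : ∀ k ∈ PySem.List.pyRange 0 ((N : Int)+1) 1, 0 ≤ k := by
    intro k hk
    exact (PySem.List.mem_pyRange_one.mp hk).1
  have hsh0 := pvShape_replicate M N
  have hsh1 : pvShape ((PySem.List.pyRange 0 ((M : Int)+1) 1).foldl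
      (fun dp i => pvSet2 dp i 0 (some 0))
      (List.replicate (M+1) (List.replicate (N+1) (none : Option Int)))) M N :=
    pvShape_foldl (fun dp k h => pvShape_pvSet2 h _ _ _) _ hsh0
  rw [pvFoldRow0 _ hpos2 hsh1 i j hi hj, pvFoldCol0 _ hpos1 hsh0 i j hi hj,
    pvGet2o_replicate M N i j hi]
  have hmi : ((i : Int) ∈ PySem.List.pyRange 0 ((M : Int)+1) 1) := by
    rw [PySem.List.mem_pyRange_one]; omega
  have hmj : ((j : Int) ∈ PySem.List.pyRange 0 ((N : Int)+1) 1) := by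
    rw [PySem.List.mem_pyRange_one]; omega
  by_cases hi0 : i = 0
  · simp [hi0, hmj]
  · by_cases hj0 : j = 0
    · simp [hi0, hj0, hmi]
    · simp [hi0, hj0]

theorem pvShape_dp2 (M N : Nat) :
    pvShape ((PySem.List.pyRange 0 ((N : Int)+1) 1).foldl (fun dp j => pvSet2 dp 0 j (some 0))
      ((PySem.List.pyRange 0 ((M : Int)+1) 1).foldl (fun dp i => pvSet2 dp i 0 (some 0))
        (List.replicate (M+1) (List.replicate (N+1) (none : Option Int))))) M N := by
  apply pvShape_foldl (fun dp k h => pvShape_pvSet2 h _ _ _)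
  apply pvShape_foldl (fun dp k h => pvShape_pvSet2 h _ _ _)
  exact pvShape_replicate M N

-- iteration prefixes of A's loops (proof-side views)
def pvIterA (text1 text2 : String) (i : Int) (dp : List (List (Option Int))) (t : Nat) :
    List (List (Option Int)) :=
  (PySem.List.pyRange 1 ((t : Int)+1) 1).foldl (pvCellA text1 text2 i) dp

def pvIterOA (text1 text2 : String) (n : Int) (dp : List (List (Option Int))) (t : Nat) :
    List (List (Option Int)) :=
  (PySem.List.pyRange 1 ((t : Int)+1) 1).foldl (pvRowA text1 text2 n) dp

theorem pvFoldl_pyRange_zero {σ : Type} (F : σ → Int → σ) (s : σ) :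
    (PySem.List.pyRange 1 (((0 : Nat) : Int)+1) 1).foldl F s = s := by
  rw [PySem.List.pyRange_one_eq_nil (by omega)]
  rfl

theorem pvFoldl_pyRange_succ {σ : Type} (F : σ → Int → σ) (s : σ) (t : Nat) :
    (PySem.List.pyRange 1 (((t+1 : Nat) : Int)+1) 1).foldl F s =
      F ((PySem.List.pyRange 1 ((t : Int)+1) 1).foldl F s) ((t : Int)+1) := by
  have e : ((t+1 : Nat) : Int) + 1 = ((t : Int) + 1) + 1 := by push_cast; ring
  rw [e, PySem.List.pyRange_one_succ_right (by omega), List.foldl_append]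
  rfl

-- A's inner loop fills row p+1 with pvL values
theorem pvInnerA (text1 text2 : String) (M N : Nat) (p : Nat) (hp : p + 1 ≤ M)
    (hM : M ≤ text1.toList.length) (hN : N ≤ text2.toList.length)
    (dp : List (List (Option Int))) (hsh : pvShape dp M N)
    (Hprev : ∀ i' ≤ p, ∀ j' ≤ N, pvGet2o dp i' j' = some (pvL text1.toList text2.toList i' j'))
    (Hcol : ∀ i' ≤ M, pvGet2o dp i' 0 = some 0)
    (t : Nat) (ht : t ≤ N) :
    pvShape (pvIterA text1 text2 ((p:Int)+1) dp t) M N ∧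
    (∀ j' ≤ t, pvGet2o (pvIterA text1 text2 ((p:Int)+1) dp t) (p+1) j' =
      some (pvL text1.toList text2.toList (p+1) j')) ∧
    (∀ i' j', i' ≤ M → j' ≤ N → ¬ (i' = p+1 ∧ 1 ≤ j' ∧ j' ≤ t) →
      pvGet2o (pvIterA text1 text2 ((p:Int)+1) dp t) i' j' = pvGet2o dp i' j') := by
  induction t with
  | zero =>
    rw [pvIterA, pvFoldl_pyRange_zero]
    refine ⟨hsh, ?_, fun i' j' _ _ _ => rfl⟩
    intro j' hj'
    have : j' = 0 := by omega
    subst this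
    rw [Hcol (p+1) hp, pvL_zero_right]
  | succ t ih =>
    obtain ⟨ihs, ihf, ihu⟩ := ih (by omega)
    have hstep : pvIterA text1 text2 ((p:Int)+1) dp (t+1) =
        pvCellA text1 text2 ((p:Int)+1) (pvIterA text1 text2 ((p:Int)+1) dp t) ((t:Int)+1) := by
      rw [pvIterA, pvIterA, pvFoldl_pyRange_succ]
    set dpt := pvIterA text1 text2 ((p:Int)+1) dp t with hdpt
    have hplen : p < text1.toList.length := by omega
    have htlen : t < text2.toList.length := by omega
    have ech1 : ((p:Int)+1-1 : Int) = ((p : Nat) : Int) := by ring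
    have ech2 : ((t:Int)+1-1 : Int) = ((t : Nat) : Int) := by ring
    have hch1 : PySem.Str.pyGet? text1 ((p:Int)+1-1) = some (text1.toList[p]'hplen) := by
      rw [ech1, PySem.Str.pyGet?_natCast, List.getElem?_eq_getElem hplen]
    have hch2 : PySem.Str.pyGet? text2 ((t:Int)+1-1) = some (text2.toList[t]'htlen) := by
      rw [ech2, PySem.Str.pyGet?_natCast, List.getElem?_eq_getElem htlen]
    have hgdiag : pvGet2 dpt ((p:Int)+1-1) ((t:Int)+1-1) = pvL text1.toList text2.toList p t := by
      rw [ech1, ech2, pvGet2_eq, ihu p t (by omega) (by omega) (by omega),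
        Hprev p (le_refl p) t (by omega)]
      rfl
    have hgup : pvGet2 dpt ((p:Int)+1-1) ((t:Int)+1) =
        pvL text1.toList text2.toList p (t+1) := by
      have e : ((t:Int)+1) = (((t+1 : Nat)) : Int) := by push_cast; ring
      rw [ech1, e, pvGet2_eq, ihu p (t+1) (by omega) (by omega) (by omega),
        Hprev p (le_refl p) (t+1) (by omega)]
      rfl
    have hgleft : pvGet2 dpt ((p:Int)+1) ((t:Int)+1-1) =
        pvL text1.toList text2.toList (p+1) t := by
      have e : ((p:Int)+1) = (((p+1 : Nat)) : Int) := by push_cast; ring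
      rw [ech2, e, pvGet2_eq, ihf t (le_refl t)]
      rfl
    have hLsucc : pvL text1.toList text2.toList (p+1) (t+1) =
        if text1.toList[p]'hplen = text2.toList[t]'htlen then
          1 + pvL text1.toList text2.toList p t
        else max (pvL text1.toList text2.toList (p+1) t)
          (pvL text1.toList text2.toList p (t+1)) := by
      rw [pvL]
      rw [List.getD_eq_getElem _ _ hplen, List.getD_eq_getElem _ _ htlen]
    have hip : ((p:Int)+1) = (((p+1 : Nat)) : Int) := by push_cast; ring
    have hjt : ((t:Int)+1) = (((t+1 : Nat)) : Int) := by push_cast; ring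
    rw [hstep, pvCellA, hch1, hch2]
    by_cases hcc : text1.toList[p]'hplen = text2.toList[t]'htlen
    · rw [if_pos (by rw [hcc]), hgdiag]
      refine ⟨pvShape_pvSet2 ihs _ _ _, ?_, ?_⟩
      · intro j' hj'
        by_cases hje : j' = t+1
        · subst hje
          rw [pvGet2o_pvSet2_self' ihs hip hjt (by omega) (by omega), hLsucc, if_pos hcc]
        · rw [pvGet2o_pvSet2_ne' (by omega) (by omega) (by
            intro hc
            exact hje (by omega))]
          exact ihf j' (by omega)
      · intro i' j' hi' hj' hreg
        rw [pvGet2o_pvSet2_ne' (by omega) (by omega) (by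
          intro hc
          exact hreg ⟨by omega, by omega, by omega⟩)]
        exact ihu i' j' hi' hj' (fun hc => hreg ⟨hc.1, hc.2.1, by omega⟩)
    · rw [if_neg (by
        intro hc
        exact hcc (Option.some.inj hc)), hgup, hgleft]
      refine ⟨pvShape_pvSet2 ihs _ _ _, ?_, ?_⟩
      · intro j' hj'
        by_cases hje : j' = t+1
        · subst hje
          rw [pvGet2o_pvSet2_self' ihs hip hjt (by omega) (by omega), hLsucc, if_neg hcc]
          rw [max_comm]
        · rw [pvGet2o_pvSet2_ne' (by omega) (by omega) (by
            intro hc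
            exact hje (by omega))]
          exact ihf j' (by omega)
      · intro i' j' hi' hj' hreg
        rw [pvGet2o_pvSet2_ne' (by omega) (by omega) (by
          intro hc
          exact hreg ⟨by omega, by omega, by omega⟩)]
        exact ihu i' j' hi' hj' (fun hc => hreg ⟨hc.1, hc.2.1, by omega⟩)

-- A's outer loop: rows 0..t filled
theorem pvOuterA (text1 text2 : String) (M N : Nat)
    (hM : M ≤ text1.toList.length) (hN : N ≤ text2.toList.length)
    (dp : List (List (Option Int))) (hsh : pvShape dp M N)
    (H0 : ∀ i' ≤ M, ∀ j' ≤ N, pvGet2o dp i' j' = if i' = 0 ∨ j' = 0 then some 0 else none)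
    (t : Nat) (ht : t ≤ M) :
    pvShape (pvIterOA text1 text2 (N : Int) dp t) M N ∧
    (∀ i' ≤ t, ∀ j' ≤ N, pvGet2o (pvIterOA text1 text2 (N : Int) dp t) i' j' =
      some (pvL text1.toList text2.toList i' j')) ∧
    (∀ i' ≤ M, pvGet2o (pvIterOA text1 text2 (N : Int) dp t) i' 0 = some 0) := by
  induction t with
  | zero =>
    rw [pvIterOA, pvFoldl_pyRange_zero]
    refine ⟨hsh, ?_, ?_⟩
    · intro i' hi' j' hj'
      have : i' = 0 := by omega
      subst this
      rw [H0 0 (by omega) j' hj', pvL_zero_left]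
      simp
    · intro i' hi'
      rw [H0 i' hi' 0 (by omega)]
      simp
  | succ t ih =>
    obtain ⟨ihs, ihf, ihc⟩ := ih (by omega)
    have hstep : pvIterOA text1 text2 (N : Int) dp (t+1) =
        pvRowA text1 text2 (N : Int) (pvIterOA text1 text2 (N : Int) dp t) ((t:Int)+1) := by
      rw [pvIterOA, pvIterOA, pvFoldl_pyRange_succ]
    have hrow : pvRowA text1 text2 (N : Int) (pvIterOA text1 text2 (N : Int) dp t) ((t:Int)+1) =
        pvIterA text1 text2 ((t:Int)+1) (pvIterOA text1 text2 (N : Int) dp t) N := rfl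
    have hin := pvInnerA text1 text2 M N t (by omega) hM hN
      (pvIterOA text1 text2 (N : Int) dp t) ihs
      (fun i' hi' j' hj' => ihf i' hi' j' hj') ihc N (le_refl N)
    obtain ⟨hs2, hf2, hu2⟩ := hin
    rw [hstep, hrow]
    refine ⟨hs2, ?_, ?_⟩
    · intro i' hi' j' hj'
      by_cases hie : i' = t+1
      · subst hie
        by_cases hj0 : j' = 0
        · subst hj0
          rw [hu2 (t+1) 0 (by omega) (by omega) (by omega), ihc (t+1) (by omega),
            pvL_zero_right]
        · exact hf2 j' hj'
      · rw [hu2 i' j' (by omega) hj' (by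
          intro hc
          exact hie hc.1)]
        exact ihf i' (by omega) j' hj'
    · intro i' hi'
      rw [hu2 i' 0 hi' (by omega) (by omega)]
      exact ihc i' hi'

-- ===== B-side lemmas =====

-- every memo entry is the pvL value of its cell
def pvGood (a b : List Char) (memo : PySem.Dict (Int × Int) Int) : Prop :=
  ∀ i j v, memo.get? (i, j) = some v → v = pvL a b i.toNat j.toNat

theorem pvGood_empty (a b : List Char) :
    pvGood a b (PySem.Dict.empty : PySem.Dict (Int × Int) Int) := by
  intro i j v h
  simp [PySem.Dict.get?_empty] at h

theorem pvGood_insert (a b : List Char) (memo : PySem.Dict (Int × Int) Int) (i j : Int) (v : Int)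
    (hg : pvGood a b memo) (hv : v = pvL a b i.toNat j.toNat) :
    pvGood a b (memo.insert (i, j) v) := by
  intro i' j' v' h
  rw [PySem.Dict.get?_insert] at h
  split_ifs at h with hc
  · obtain ⟨h1, h2⟩ := Prod.mk.injEq .. ▸ hc
    subst h1; subst h2
    cases h
    exact hv
  · exact hg i' j' v' h

theorem pvMono_insert (memo : PySem.Dict (Int × Int) Int) (q : Int × Int) (v : Int) :
    ∀ p, (memo.get? p).isSome = true → ((memo.insert q v).get? p).isSome = true := by
  intro p h
  rw [PySem.Dict.get?_insert]
  split_ifs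
  · rfl
  · exact h

-- a pvValB value is the pvL value of its cell
theorem pvValB_correct (a b : List Char) (memo : PySem.Dict (Int × Int) Int)
    (hg : pvGood a b memo) (i j : Int) (d : Int)
    (h : pvValB memo i j = some d) : d = pvL a b i.toNat j.toNat := by
  unfold pvValB at h
  split_ifs at h with hb
  · cases h
    rcases hb with hb | hb
    · subst hb; simp [pvL_zero_left]
    · subst hb; simp [pvL_zero_right]
  · exact hg i j d h

theorem pvValB_mono (memo memo' : PySem.Dict (Int × Int) Int)
    (hmono : ∀ p, (memo.get? p).isSome = true → (memo'.get? p).isSome = true)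
    (i j : Int) (h : (pvValB memo i j).isSome = true) : (pvValB memo' i j).isSome = true := by
  unfold pvValB at *
  split_ifs at * with hb
  · rfl
  · exact hmono _ h

-- one step of the loop when the top cell is ready (in memo, or its needed deps are in):
-- it is popped and afterwards the memo holds its pvL value
theorem pvResolve (text1 text2 : String) (M N : Nat)
    (hM : M ≤ text1.toList.length) (hN : N ≤ text2.toList.length)
    (i j : Int) (rest : List (Int × Int)) (memo : PySem.Dict (Int × Int) Int)
    (hi1 : 1 ≤ i) (hiM : i ≤ (M : Int)) (hj1 : 1 ≤ j) (hjN : j ≤ (N : Int))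
    (hg : pvGood text1.toList text2.toList memo)
    (hready : (memo.get? (i, j)).isSome = true ∨
      ((PySem.Str.pyGet? text1 (i-1) = PySem.Str.pyGet? text2 (j-1) →
          (pvValB memo (i-1) (j-1)).isSome = true) ∧
        (PySem.Str.pyGet? text1 (i-1) ≠ PySem.Str.pyGet? text2 (j-1) →
          (pvValB memo (i-1) j).isSome = true ∧ (pvValB memo i (j-1)).isSome = true))) :
    ∃ memo', pvStepB text1 text2 ((i, j) :: rest, memo) = (rest, memo') ∧
      pvGood text1.toList text2.toList memo' ∧
      (∀ p, (memo.get? p).isSome = true → (memo'.get? p).isSome = true) ∧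
      (memo'.get? (i, j)).isSome = true := by
  have hp : i.toNat - 1 < text1.toList.length := by omega
  have hq : j.toNat - 1 < text2.toList.length := by omega
  have e1 : i - 1 = ((i.toNat - 1 : Nat) : Int) := by omega
  have e2 : j - 1 = ((j.toNat - 1 : Nat) : Int) := by omega
  have hch1 : PySem.Str.pyGet? text1 (i-1) = some (text1.toList[i.toNat - 1]'hp) := by
    rw [e1, PySem.Str.pyGet?_natCast, List.getElem?_eq_getElem hp]
  have hch2 : PySem.Str.pyGet? text2 (j-1) = some (text2.toList[j.toNat - 1]'hq) := by
    rw [e2, PySem.Str.pyGet?_natCast, List.getElem?_eq_getElem hq]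
  have eI : i.toNat = (i.toNat - 1) + 1 := by omega
  have eJ : j.toNat = (j.toNat - 1) + 1 := by omega
  have hLij : pvL text1.toList text2.toList i.toNat j.toNat =
      if text1.toList[i.toNat - 1]'hp = text2.toList[j.toNat - 1]'hq then
        1 + pvL text1.toList text2.toList (i.toNat - 1) (j.toNat - 1)
      else max (pvL text1.toList text2.toList i.toNat (j.toNat - 1))
        (pvL text1.toList text2.toList (i.toNat - 1) j.toNat) := by
    conv_lhs => rw [eI, eJ]
    rw [pvL, List.getD_eq_getElem _ _ hp, List.getD_eq_getElem _ _ hq, ← eI, ← eJ]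
  by_cases hmem : (memo.get? (i, j)).isSome = true
  · refine ⟨memo, ?_, hg, fun p h => h, hmem⟩
    simp only [pvStepB]
    rw [if_pos (Or.inr (Or.inr (by
      rw [PySem.Dict.contains_eq_isSome_get?]; exact hmem)))]
  · rcases hready with hready | ⟨hdeq, hdne⟩
    · exact absurd hready hmem
    have hnotc : ¬ (i = 0 ∨ j = 0 ∨ memo.contains (i, j) = true) := by
      intro hc
      rcases hc with hc | hc | hc
      · omega
      · omega
      · rw [PySem.Dict.contains_eq_isSome_get?] at hc
        exact hmem hc
    by_cases he : PySem.Str.pyGet? text1 (i-1) = PySem.Str.pyGet? text2 (j-1)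
    · have hcc : text1.toList[i.toNat - 1]'hp = text2.toList[j.toNat - 1]'hq := by
        rw [hch1, hch2] at he
        exact Option.some.inj he
      obtain ⟨d, hd⟩ := Option.isSome_iff_exists.mp (hdeq he)
      have hdv : d = pvL text1.toList text2.toList (i.toNat - 1) (j.toNat - 1) := by
        have := pvValB_correct _ _ _ hg (i-1) (j-1) d hd
        rwa [show (i-1).toNat = i.toNat - 1 by omega, show (j-1).toNat = j.toNat - 1 by omega]
          at this
      refine ⟨memo.insert (i, j) (d + 1), ?_, ?_, pvMono_insert memo _ _, ?_⟩
      · simp only [pvStepB]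
        rw [if_neg hnotc, if_pos he, hd]
      · exact pvGood_insert _ _ _ _ _ _ hg (by rw [hLij, if_pos hcc, hdv]; ring)
      · rw [PySem.Dict.get?_insert_self]
        rfl
    · have hcc : ¬ text1.toList[i.toNat - 1]'hp = text2.toList[j.toNat - 1]'hq := by
        intro hc
        exact he (by rw [hch1, hch2, hc])
      obtain ⟨hu, hl⟩ := hdne he
      obtain ⟨u, hu'⟩ := Option.isSome_iff_exists.mp hu
      obtain ⟨l, hl'⟩ := Option.isSome_iff_exists.mp hl
      have huv : u = pvL text1.toList text2.toList (i.toNat - 1) j.toNat := by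
        have := pvValB_correct _ _ _ hg (i-1) j u hu'
        rwa [show (i-1).toNat = i.toNat - 1 by omega] at this
      have hlv : l = pvL text1.toList text2.toList i.toNat (j.toNat - 1) := by
        have := pvValB_correct _ _ _ hg i (j-1) l hl'
        rwa [show (j-1).toNat = j.toNat - 1 by omega] at this
      refine ⟨memo.insert (i, j) (max u l), ?_, ?_, pvMono_insert memo _ _, ?_⟩
      · simp only [pvStepB]
        rw [if_neg hnotc, if_neg he, hu', hl']
      · exact pvGood_insert _ _ _ _ _ _ hg (by rw [hLij, if_neg hcc, huv, hlv, max_comm])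
      · rw [PySem.Dict.get?_insert_self]
        rfl
    
-- the run lemma: enough fuel resolves the top cell and pops it, growing the memo correctly
theorem pvRunB (text1 text2 : String) (M N : Nat)
    (hM : M ≤ text1.toList.length) (hN : N ≤ text2.toList.length) :
    ∀ K : Nat, ∀ (i j : Int) (rest : List (Int × Int)) (memo : PySem.Dict (Int × Int) Int),
      1 ≤ i → i ≤ (M : Int) → 1 ≤ j → j ≤ (N : Int) → i.toNat + j.toNat ≤ K →
      pvGood text1.toList text2.toList memo →
      ∃ (f : Nat) (memo' : PySem.Dict (Int × Int) Int), f ≤ 3 ^ K ∧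
        (pvStepB text1 text2)^[f] ((i, j) :: rest, memo) = (rest, memo') ∧
        pvGood text1.toList text2.toList memo' ∧
        (∀ p, (memo.get? p).isSome = true → (memo'.get? p).isSome = true) ∧
        (memo'.get? (i, j)).isSome = true := by
  intro K
  induction K using Nat.strong_induction_on with
  | _ K ih =>
  intro i j rest memo hi1 hiM hj1 hjN hK hg
  have h1pow : 1 ≤ 3 ^ K := Nat.one_le_pow _ _ (by norm_num)
  by_cases hmem : (memo.get? (i, j)).isSome = true
  · obtain ⟨memo', hstep, hg', hmono, hres⟩ :=
      pvResolve text1 text2 M N hM hN i j rest memo hi1 hiM hj1 hjN hg (Or.inl hmem)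
    exact ⟨1, memo', h1pow, by rw [Function.iterate_one, hstep], hg', hmono, hres⟩
  have hnotc : ¬ (i = 0 ∨ j = 0 ∨ memo.contains (i, j) = true) := by
    intro hc
    rcases hc with hc | hc | hc
    · omega
    · omega
    · rw [PySem.Dict.contains_eq_isSome_get?] at hc
      exact hmem hc
  have h3K : 3 ^ (K - 1) * 3 = 3 ^ K := by
    rw [← pow_succ]
    congr 1
    omega
  have h1pow' : 1 ≤ 3 ^ (K - 1) := Nat.one_le_pow _ _ (by norm_num)
  by_cases he : PySem.Str.pyGet? text1 (i-1) = PySem.Str.pyGet? text2 (j-1)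
  · -- equal characters: only the diagonal subproblem is needed
    cases hdg : pvValB memo (i-1) (j-1) with
    | some d =>
      obtain ⟨memo', hstep, hg', hmono, hres⟩ :=
        pvResolve text1 text2 M N hM hN i j rest memo hi1 hiM hj1 hjN hg
          (Or.inr ⟨fun _ => by rw [hdg]; rfl, fun hne => absurd he hne⟩)
      exact ⟨1, memo', h1pow, by rw [Function.iterate_one, hstep], hg', hmono, hres⟩
    | none =>
      have hij2 : 2 ≤ i ∧ 2 ≤ j := by
        unfold pvValB at hdg
        split_ifs at hdg with hb
        constructor <;> omega
      have hpush : pvStepB text1 text2 ((i, j) :: rest, memo) =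
          ((i-1, j-1) :: (i, j) :: rest, memo) := by
        simp only [pvStepB]
        rw [if_neg hnotc, if_pos he, hdg]
      obtain ⟨f1, memo1, hf1, hit1, hg1, hmono1, hres1⟩ :=
        ih (K - 1) (by omega) (i-1) (j-1) ((i, j) :: rest) memo
          (by omega) (by omega) (by omega) (by omega) (by omega) hg
      have hdg1 : (pvValB memo1 (i-1) (j-1)).isSome = true := by
        unfold pvValB
        rw [if_neg (by omega)]
        exact hres1
      obtain ⟨memo2, hstep2, hg2, hmono2, hres2⟩ :=
        pvResolve text1 text2 M N hM hN i j rest memo1 hi1 hiM hj1 hjN hg1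
          (Or.inr ⟨fun _ => hdg1, fun hne => absurd he hne⟩)
      refine ⟨1 + (f1 + 1), memo2, by omega, ?_, hg2,
        fun p hp => hmono2 p (hmono1 p hp), hres2⟩
      rw [Function.iterate_add_apply _ 1 (f1 + 1), Function.iterate_add_apply _ f1 1,
        Function.iterate_one, hpush, hit1, hstep2]
  · -- unequal characters: the up and left subproblems are needed
    cases hu : pvValB memo (i-1) j with
    | some u =>
      cases hl : pvValB memo i (j-1) with
      | some l =>
        obtain ⟨memo', hstep, hg', hmono, hres⟩ :=
          pvResolve text1 text2 M N hM hN i j rest memo hi1 hiM hj1 hjN hg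
            (Or.inr ⟨fun heq => absurd heq he,
              fun _ => ⟨by rw [hu]; rfl, by rw [hl]; rfl⟩⟩)
        exact ⟨1, memo', h1pow, by rw [Function.iterate_one, hstep], hg', hmono, hres⟩
      | none =>
        have hj2 : 2 ≤ j := by
          unfold pvValB at hl
          split_ifs at hl with hb
          omega
        have hpush : pvStepB text1 text2 ((i, j) :: rest, memo) =
            ((i, j-1) :: (i, j) :: rest, memo) := by
          simp only [pvStepB]
          rw [if_neg hnotc, if_neg he, hu, hl]
        obtain ⟨f1, memo1, hf1, hit1, hg1, hmono1, hres1⟩ :=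
          ih (K - 1) (by omega) i (j-1) ((i, j) :: rest) memo
            hi1 hiM (by omega) (by omega) (by omega) hg
        have hu1 : (pvValB memo1 (i-1) j).isSome = true :=
          pvValB_mono memo memo1 hmono1 _ _ (by rw [hu]; rfl)
        have hl1 : (pvValB memo1 i (j-1)).isSome = true := by
          unfold pvValB
          rw [if_neg (by omega)]
          exact hres1
        obtain ⟨memo2, hstep2, hg2, hmono2, hres2⟩ :=
          pvResolve text1 text2 M N hM hN i j rest memo1 hi1 hiM hj1 hjN hg1
            (Or.inr ⟨fun heq => absurd heq he, fun _ => ⟨hu1, hl1⟩⟩)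
        refine ⟨1 + (f1 + 1), memo2, by omega, ?_, hg2,
          fun p hp => hmono2 p (hmono1 p hp), hres2⟩
        rw [Function.iterate_add_apply _ 1 (f1 + 1), Function.iterate_add_apply _ f1 1,
          Function.iterate_one, hpush, hit1, hstep2]
    | none =>
      have hi2 : 2 ≤ i := by
        unfold pvValB at hu
        split_ifs at hu with hb
        omega
      have hpush : pvStepB text1 text2 ((i, j) :: rest, memo) =
          ((i-1, j) :: (i, j) :: rest, memo) := by
        simp only [pvStepB]
        rw [if_neg hnotc, if_neg he, hu]
      obtain ⟨f1, memo1, hf1, hit1, hg1, hmono1, hres1⟩ :=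
        ih (K - 1) (by omega) (i-1) j ((i, j) :: rest) memo
          (by omega) (by omega) hj1 hjN (by omega) hg
      have hu1 : (pvValB memo1 (i-1) j).isSome = true := by
        unfold pvValB
        rw [if_neg (by omega)]
        exact hres1
      by_cases hmem1 : (memo1.get? (i, j)).isSome = true
      · obtain ⟨memo2, hstep2, hg2, hmono2, hres2⟩ :=
          pvResolve text1 text2 M N hM hN i j rest memo1 hi1 hiM hj1 hjN hg1 (Or.inl hmem1)
        refine ⟨1 + (f1 + 1), memo2, by omega, ?_, hg2,
          fun p hp => hmono2 p (hmono1 p hp), hres2⟩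
        rw [Function.iterate_add_apply _ 1 (f1 + 1), Function.iterate_add_apply _ f1 1,
          Function.iterate_one, hpush, hit1, hstep2]
      cases hl1 : pvValB memo1 i (j-1) with
      | some l1 =>
        obtain ⟨memo2, hstep2, hg2, hmono2, hres2⟩ :=
          pvResolve text1 text2 M N hM hN i j rest memo1 hi1 hiM hj1 hjN hg1
            (Or.inr ⟨fun heq => absurd heq he,
              fun _ => ⟨hu1, by rw [hl1]; rfl⟩⟩)
        refine ⟨1 + (f1 + 1), memo2, by omega, ?_, hg2,
          fun p hp => hmono2 p (hmono1 p hp), hres2⟩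
        rw [Function.iterate_add_apply _ 1 (f1 + 1), Function.iterate_add_apply _ f1 1,
          Function.iterate_one, hpush, hit1, hstep2]
      | none =>
        have hj2 : 2 ≤ j := by
          unfold pvValB at hl1
          split_ifs at hl1 with hb
          omega
        have hnotc1 : ¬ (i = 0 ∨ j = 0 ∨ memo1.contains (i, j) = true) := by
          intro hc
          rcases hc with hc | hc | hc
          · omega
          · omega
          · rw [PySem.Dict.contains_eq_isSome_get?] at hc
            exact hmem1 hc
        obtain ⟨u1, hu1'⟩ := Option.isSome_iff_exists.mp hu1
        have hpush2 : pvStepB text1 text2 ((i, j) :: rest, memo1) =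
            ((i, j-1) :: (i, j) :: rest, memo1) := by
          simp only [pvStepB]
          rw [if_neg hnotc1, if_neg he, hu1', hl1]
        obtain ⟨f2, memo2, hf2, hit2, hg2, hmono2, hres2⟩ :=
          ih (K - 1) (by omega) i (j-1) ((i, j) :: rest) memo1
            hi1 hiM (by omega) (by omega) (by omega) hg1
        have hu2 : (pvValB memo2 (i-1) j).isSome = true :=
          pvValB_mono memo1 memo2 hmono2 _ _ hu1
        have hl2 : (pvValB memo2 i (j-1)).isSome = true := by
          unfold pvValB
          rw [if_neg (by omega)]
          exact hres2
        obtain ⟨memo3, hstep3, hg3, hmono3, hres3⟩ :=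
          pvResolve text1 text2 M N hM hN i j rest memo2 hi1 hiM hj1 hjN hg2
            (Or.inr ⟨fun heq => absurd heq he, fun _ => ⟨hu2, hl2⟩⟩)
        have h33 : 3 ≤ 3 ^ (K - 1) := by
          calc (3 : Nat) = 3 ^ 1 := rfl
            _ ≤ 3 ^ (K - 1) := Nat.pow_le_pow_right (by norm_num) (by omega)
        refine ⟨1 + (f2 + (1 + (f1 + 1))), memo3, by omega, ?_, hg3,
          fun p hp => hmono3 p (hmono2 p (hmono1 p hp)), hres3⟩
        rw [Function.iterate_add_apply _ 1 (f2 + (1 + (f1 + 1))),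
          Function.iterate_add_apply _ f2 (1 + (f1 + 1)),
          Function.iterate_add_apply _ 1 (f1 + 1),
          Function.iterate_add_apply _ f1 1,
          Function.iterate_one, hpush, hit1, hpush2, hit2, hstep3]

-- the early-exit loop is the iterate of the step (the step fixes the empty stack)
theorem pvLoopB_eq_iterate (text1 text2 : String) :
    ∀ (f : Nat) (st : List (Int × Int) × PySem.Dict (Int × Int) Int),
      pvLoopB text1 text2 f st = (pvStepB text1 text2)^[f] st := by
  intro f
  induction f with
  | zero => intro st; rfl
  | succ f ihf =>
    intro st
    obtain ⟨stack, memo⟩ := st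
    cases stack with
    | nil =>
      rw [show pvLoopB text1 text2 (f+1) ([], memo) = ([], memo) from rfl]
      exact (Function.iterate_fixed rfl (f+1)).symm
    | cons top rest =>
      rw [show pvLoopB text1 text2 (f+1) (top :: rest, memo) =
        pvLoopB text1 text2 f (pvStepB text1 text2 (top :: rest, memo)) from rfl,
        ihf, Function.iterate_succ_apply]

-- fuel ≥ needed: the loop reaches the empty stack and then stays there
theorem pvLoopB_final (text1 text2 : String) (f F : Nat) (hf : f ≤ F)
    (st : List (Int × Int) × PySem.Dict (Int × Int) Int)
    (memo' : PySem.Dict (Int × Int) Int)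
    (h : (pvStepB text1 text2)^[f] st = ([], memo')) :
    pvLoopB text1 text2 F st = ([], memo') := by
  rw [pvLoopB_eq_iterate]
  have e : F = (F - f) + f := by omega
  rw [e, Function.iterate_add_apply, h]
  exact Function.iterate_fixed rfl _

-- ===== VERDICT (by name: the statement is the Claim_ definition above) =====
-- a fold whose step is the identity (empty inner range) leaves the table unchanged
theorem pvFoldl_id {σ : Type} (F : σ → Int → σ) (hF : ∀ s k, F s k = s)
    (L : List Int) (s : σ) : L.foldl F s = s := by
  induction L generalizing s with
  | nil => rfl
  | cons k L ih => rw [List.foldl_cons, hF]; exact ih s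

-- B's result on degenerate inputs (m = 0 or n = 0): the guard in the return makes it m + n
theorem pvAlt_zero (text1 text2 : String) (m n : Int) (h : m = 0 ∨ n = 0) :
    convert_alt text1 text2 m n = m + n := by
  unfold convert_alt
  simp only [if_pos h]
  ring

-- B's result in the main case is m + n - 2·pvL
theorem pvAlt_main (text1 text2 : String) (M N : Nat) (hM1 : 1 ≤ M) (hN1 : 1 ≤ N)
    (hM : M ≤ text1.toList.length) (hN : N ≤ text2.toList.length) :
    convert_alt text1 text2 (M : Int) (N : Int) =
      (M : Int) + (N : Int) - 2 * pvL text1.toList text2.toList M N := by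
  obtain ⟨f, memo', hfle, hiter, hgood, _, hsome⟩ :=
    pvRunB text1 text2 M N hM hN (M + N) (M : Int) (N : Int) [] PySem.Dict.empty
      (by omega) (by omega) (by omega) (by omega) (by omega)
      (pvGood_empty text1.toList text2.toList)
  obtain ⟨v, hv⟩ := Option.isSome_iff_exists.mp hsome
  have hval : v = pvL text1.toList text2.toList M N := by
    have := hgood (M : Int) (N : Int) v hv
    simpa using this
  unfold convert_alt
  have hfuel : f ≤ 3 ^ ((M : Int).toNat + (N : Int).toNat) + 1 := by
    simp only [Int.toNat_natCast]
    omega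
  rw [if_neg (by omega : ¬ ((M : Int) = 0 ∨ (N : Int) = 0))]
  rw [pvLoopB_final text1 text2 f _ hfuel _ _ hiter]
  simp only [hv, Option.getD_some, hval]

theorem convert_spec : Claim_equal_convert := by
  intro text1 text2 m n _ hpre
  obtain ⟨hm0, hn0, hpm, hpn⟩ := hpre
  rw [PySem.Str.len_eq] at hpm hpn
  unfold Spec_convert convert
  simp only []
  obtain ⟨M, rfl⟩ : ∃ M : Nat, m = (M : Int) := ⟨m.toNat, by omega⟩
  obtain ⟨N, rfl⟩ : ∃ N : Nat, n = (N : Int) := ⟨n.toNat, by omega⟩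
  rw [pvDp0]
  by_cases hN0 : N = 0
  · -- n = 0: A's inner loops are empty and dp[m][0] = 0; B's guard returns m + 0
    subst hN0
    have hA : (PySem.List.pyRange 1 ((M : Int)+1) 1).foldl (pvRowA text1 text2 ((0:Nat) : Int))
        ((PySem.List.pyRange 0 (((0:Nat) : Int)+1) 1).foldl (fun dp j => pvSet2 dp 0 j (some 0))
          ((PySem.List.pyRange 0 ((M : Int)+1) 1).foldl (fun dp i => pvSet2 dp i 0 (some 0))
            (List.replicate (M+1) (List.replicate (0+1) (none : Option Int))))) =
        ((PySem.List.pyRange 0 (((0:Nat) : Int)+1) 1).foldl (fun dp j => pvSet2 dp 0 j (some 0))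
          ((PySem.List.pyRange 0 ((M : Int)+1) 1).foldl (fun dp i => pvSet2 dp i 0 (some 0))
            (List.replicate (M+1) (List.replicate (0+1) (none : Option Int))))) := by
      apply pvFoldl_id
      intro s k
      rw [pvRowA, PySem.List.pyRange_one_eq_nil (by omega)]
      rfl
    rw [hA, pvGet2_eq, pvDp2 M 0 M 0 (le_refl M) (le_refl 0), if_pos (Or.inr rfl)]
    rw [pvAlt_zero text1 text2 _ _ (Or.inr (by simp))]
    simp
  · by_cases hM0 : M = 0
    · -- m = 0: A's outer loop is empty and dp[0][n] = 0; B's guard returns 0 + n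
      subst hM0
      rw [show PySem.List.pyRange 1 (((0:Nat) : Int)+1) 1 = ([] : List Int) from
        PySem.List.pyRange_one_eq_nil (by omega)]
      simp only [List.foldl_nil]
      rw [pvGet2_eq, pvDp2 0 N 0 N (le_refl 0) (le_refl N), if_pos (Or.inl rfl)]
      rw [pvAlt_zero text1 text2 _ _ (Or.inl (by simp))]
      simp
    · -- main case: 1 ≤ m ≤ len(text1), 1 ≤ n ≤ len(text2)
      have hM : M ≤ text1.toList.length := by
        rcases hpn with h | h
        · omega
        · rcases hpm with h2 | h2
          · omega
          · omega
      have hN : N ≤ text2.toList.length := by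
        rcases hpm with h | h
        · omega
        · omega
      have hsh2 := pvShape_dp2 M N
      have hA := pvOuterA text1 text2 M N hM hN _ hsh2
        (fun i' hi' j' hj' => pvDp2 M N i' j' hi' hj') M (le_refl M)
      rw [show (PySem.List.pyRange 1 ((M : Int)+1) 1).foldl (pvRowA text1 text2 ((N:Nat) : Int))
          ((PySem.List.pyRange 0 (((N:Nat) : Int)+1) 1).foldl (fun dp j => pvSet2 dp 0 j (some 0))
            ((PySem.List.pyRange 0 ((M : Int)+1) 1).foldl (fun dp i => pvSet2 dp i 0 (some 0))
              (List.replicate (M+1) (List.replicate (N+1) (none : Option Int))))) =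
          pvIterOA text1 text2 ((N:Nat) : Int)
            ((PySem.List.pyRange 0 (((N:Nat) : Int)+1) 1).foldl (fun dp j => pvSet2 dp 0 j (some 0))
              ((PySem.List.pyRange 0 ((M : Int)+1) 1).foldl (fun dp i => pvSet2 dp i 0 (some 0))
                (List.replicate (M+1) (List.replicate (N+1) (none : Option Int))))) M from rfl]
      rw [pvGet2_eq, hA.2.1 M (le_refl M) N (le_refl N)]
      rw [pvAlt_main text1 text2 M N (by omega) (by omega) hM hN]
      rfl
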